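-- pv_equiv track=rewrite | github.com/WM-Jo97/TIL | ALGORITHM/0922/0922_greedy_2/4366.py | CHECK
-- ===== SOURCE A (Python) =====
-- def BIT_2_SACN(BIT_2):
--     TOTAL = 0
--     for i in range(len(BIT_2)-1,-1,-1):
--         if BIT_2[i] == 1:
--             TOTAL += 2**(len(BIT_2)-1-i)
--
--     return TOTAL
--
-- def BIT_3_SCAN(BIT_3):
--     TOTAL = 0
--     for i in range(len(BIT_3)-1,-1,-1):
--         if BIT_3[i] != 0:
--             TOTAL += BIT_3[i]*(3**(len(BIT_3)-1-i))
--     return TOTAL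
--
-- def CHECK(BIT_2, BIT_3):
--     for i in range(len(BIT_2)):
--         B = int(BIT_2[i])
--         if BIT_2[i] == 1:
--             BIT_2[i] = 0
--         else:
--             BIT_2[i] = 1
--         BIT_2_NUM = BIT_2_SACN(BIT_2)
--         if BIT_2_NUM == BIT_3_SCAN(BIT_3):
--                 return BIT_2_NUM
--         else:
--             for j in range(len(BIT_3)):
--                 A = int(BIT_3[j])
--                 for x in range(3):
--                     BIT_3[j] = x
--                     BIT_3_NUM = BIT_3_SCAN(BIT_3)
--                     if BIT_3_NUM == BIT_2_NUM:
--                         return BIT_3_NUM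
--
--                 BIT_3[j] = A
--         BIT_2[i] = B
-- ===== SOURCE B (Python) =====
-- def CHECK(BIT_2, BIT_3):
--     n = len(BIT_2)
--     m = len(BIT_3)
--     pow2 = [2 ** (n - 1 - i) for i in range(n)]
--     pow3 = [3 ** (m - 1 - j) for j in range(m)]
--     base2 = sum(pow2[i] for i in range(n) if BIT_2[i] == 1)
--     base3 = sum(BIT_3[j] * pow3[j] for j in range(m))
--     for i in range(n):
--         num = base2 - pow2[i] if BIT_2[i] == 1 else base2 + pow2[i]
--         if num == base3:
--             return num
--         for j in range(m):
--             for x in range(3):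
--                 val = base3 + (x - BIT_3[j]) * pow3[j]
--                 if val == num:
--                     return val
--     return None
-- ===== Notes on version B (the rewrite author's own statement) =====
-- stated objective: faster
-- what changed: B precomputes the base-2 and base-3 values once and updates each candidate single-digit change with O(1) incremental arithmetic (base +/- delta*power) in the same iteration order, instead of A's full rescan of the whole list for every trial change.
import Mathlib
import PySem

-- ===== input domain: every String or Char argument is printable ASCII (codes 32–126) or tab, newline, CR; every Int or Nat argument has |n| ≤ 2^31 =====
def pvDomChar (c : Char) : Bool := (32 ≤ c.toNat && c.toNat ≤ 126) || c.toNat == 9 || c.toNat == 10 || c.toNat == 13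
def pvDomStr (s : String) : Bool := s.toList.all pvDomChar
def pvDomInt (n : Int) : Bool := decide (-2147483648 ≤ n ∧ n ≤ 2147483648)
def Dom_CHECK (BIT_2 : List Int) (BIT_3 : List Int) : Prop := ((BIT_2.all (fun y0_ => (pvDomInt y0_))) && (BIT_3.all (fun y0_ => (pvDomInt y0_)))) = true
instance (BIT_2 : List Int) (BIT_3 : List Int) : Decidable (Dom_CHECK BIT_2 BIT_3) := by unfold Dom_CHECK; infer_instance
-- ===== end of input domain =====

-- B is an O(n·m) incremental re-implementation of A's O(n·m·(n+m)) re-scan search; equivalence is about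
-- the RETURN value only (A mutates its list arguments in place and leaves them modified on early return; B does not).

-- ===== PORT A =====
-- helper BIT_2_SACN: descending index loop summing 2^(len-1-i) for entries equal to 1
def BIT_2_SACN (l : List Int) : Int :=
  (PySem.List.pyRange ((l.length : Int) - 1) (-1) (-1)).foldl
    (fun tot i => if PySem.List.pyGetD l i 0 = 1 then tot + 2 ^ ((l.length : Int) - 1 - i).toNat else tot) 0

-- helper BIT_3_SCAN: descending index loop summing d*3^(len-1-i) for nonzero entries
def BIT_3_SCAN (l : List Int) : Int :=
  (PySem.List.pyRange ((l.length : Int) - 1) (-1) (-1)).foldl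
    (fun tot i => if PySem.List.pyGetD l i 0 ≠ 0
                  then tot + PySem.List.pyGetD l i 0 * 3 ^ ((l.length : Int) - 1 - i).toNat
                  else tot) 0

-- innermost 'for x in range(3)' loop of A: set BIT_3[j] = x, rescan, compare
def pvAx (n2 : Int) (b3 : List Int) (j : Nat) : List Int → Option Int
  | [] => none
  | x :: xs =>
    let n3 := BIT_3_SCAN (b3.set j x)
    if n3 = n2 then some n3 else pvAx n2 b3 j xs

-- 'for j in range(len(BIT_3))' loop of A (BIT_3[j] is restored after each j, so the base list is unchanged)
def pvAj (n2 : Int) (b3 : List Int) : List Nat → Option Int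
  | [] => none
  | j :: js =>
    match pvAx n2 b3 j [0, 1, 2] with
    | some v => some v
    | none => pvAj n2 b3 js

-- outer 'for i in range(len(BIT_2))' loop of A (BIT_2[i] is restored after each i)
def pvAi (b2 b3 : List Int) : List Nat → Option Int
  | [] => none
  | i :: is =>
    let l2 := b2.set i (if b2.getD i 0 = 1 then 0 else 1)
    let n2 := BIT_2_SACN l2
    if n2 = BIT_3_SCAN b3 then some n2
    else
      match pvAj n2 b3 (List.range b3.length) with
      | some v => some v
      | none => pvAi b2 b3 is

def CHECK (BIT_2 : List Int) (BIT_3 : List Int) : Option Int :=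
  pvAi BIT_2 BIT_3 (List.range BIT_2.length)

-- ===== PORT B =====
-- base value of BIT_2 (sum over positions holding 1), computed once
def pvBase2 (l : List Int) : Int :=
  ((List.range l.length).map (fun i => if l.getD i 0 = 1 then (2 : Int) ^ (l.length - 1 - i) else 0)).sum

-- base value of BIT_3, computed once
def pvBase3 (l : List Int) : Int :=
  ((List.range l.length).map (fun j => l.getD j 0 * (3 : Int) ^ (l.length - 1 - j))).sum

-- innermost 'for x in range(3)' loop of B: incremental update of the base-3 value
def pvBx (base3 num oldd p3 : Int) : List Int → Option Int
  | [] => none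
  | x :: xs =>
    let val := base3 + (x - oldd) * p3
    if val = num then some val else pvBx base3 num oldd p3 xs

-- 'for j in range(m)' loop of B
def pvBj (base3 num : Int) (b3 : List Int) : List Nat → Option Int
  | [] => none
  | j :: js =>
    match pvBx base3 num (b3.getD j 0) ((3 : Int) ^ (b3.length - 1 - j)) [0, 1, 2] with
    | some v => some v
    | none => pvBj base3 num b3 js

-- outer 'for i in range(n)' loop of B: incremental update of the base-2 value
def pvBi (base2 base3 : Int) (b2 b3 : List Int) : List Nat → Option Int
  | [] => none
  | i :: is =>
    let num := if b2.getD i 0 = 1 then base2 - (2 : Int) ^ (b2.length - 1 - i)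
               else base2 + (2 : Int) ^ (b2.length - 1 - i)
    if num = base3 then some num
    else
      match pvBj base3 num b3 (List.range b3.length) with
      | some v => some v
      | none => pvBi base2 base3 b2 b3 is

def CHECK_alt (BIT_2 : List Int) (BIT_3 : List Int) : Option Int :=
  pvBi (pvBase2 BIT_2) (pvBase3 BIT_3) BIT_2 BIT_3 (List.range BIT_2.length)

-- ===== PRECONDITION & SPEC =====
def Spec_CHECK (BIT_2 : List Int) (BIT_3 : List Int) (out : Option Int) : Prop := out = CHECK_alt BIT_2 BIT_3
instance (BIT_2 : List Int) (BIT_3 : List Int) (out : Option Int) : Decidable (Spec_CHECK BIT_2 BIT_3 out) := by unfold Spec_CHECK; infer_instance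

-- ===== CLAIM (what is proved, stated in full; the proofs are below) =====
def Claim_equal_CHECK : Prop := ∀ (BIT_2 : List Int) (BIT_3 : List Int), Dom_CHECK BIT_2 BIT_3 → Spec_CHECK BIT_2 BIT_3 (CHECK BIT_2 BIT_3)

-- ===== LEMMAS AND PROOFS =====

-- a descending 'for i in range(n-1,-1,-1)' accumulation is the sum over range n
theorem scan_desc (n : Nat) (g : Int → Int) :
    ((PySem.List.pyRange ((n:Int)-1) (-1) (-1)).foldl (fun tot i => tot + g i) 0)
      = ((List.range n).map (fun k : Nat => g (k:Int))).sum := by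
  rw [PySem.List.pyRange_neg_one_eq_reverse]
  have h1 : (-1 : Int) + 1 = 0 := by ring
  have h2 : ((n:Int) - 1) + 1 = (n : Int) := by ring
  rw [h1, h2, PySem.List.pyRange_zero_nat, List.foldl_reverse]
  have : (fun (i : Int) (tot : Int) => tot + g i) = fun i tot => g i + tot := by
    funext i t; ring
  rw [this, List.foldr_map]
  induction (List.range n) with
  | nil => simp
  | cons a l ih => simp [ih]

theorem scan2_eq_base2 (l : List Int) : BIT_2_SACN l = pvBase2 l := by
  unfold BIT_2_SACN pvBase2
  have hfun : (fun (tot : Int) (i : Int) =>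
        if PySem.List.pyGetD l i 0 = 1 then tot + 2 ^ (((l.length : Int)) - 1 - i).toNat else tot)
      = fun tot i => tot + (if PySem.List.pyGetD l i 0 = 1 then (2:Int) ^ (((l.length : Int)) - 1 - i).toNat else 0) := by
    funext t i; split_ifs <;> ring
  rw [hfun, scan_desc l.length
    (fun i => if PySem.List.pyGetD l i 0 = 1 then (2:Int) ^ (((l.length : Int)) - 1 - i).toNat else 0)]
  apply congrArg List.sum
  apply List.map_congr_left
  intro k hk
  have hk' : k < l.length := List.mem_range.mp hk
  have he : (((l.length : Int)) - 1 - (k:Int)).toNat = l.length - 1 - k := by omega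
  simp [he]

theorem scan3_eq_base3 (l : List Int) : BIT_3_SCAN l = pvBase3 l := by
  unfold BIT_3_SCAN pvBase3
  have hfun : (fun (tot : Int) (i : Int) =>
        if PySem.List.pyGetD l i 0 ≠ 0
        then tot + PySem.List.pyGetD l i 0 * 3 ^ (((l.length : Int)) - 1 - i).toNat else tot)
      = fun tot i => tot + PySem.List.pyGetD l i 0 * 3 ^ (((l.length : Int)) - 1 - i).toNat := by
    funext t i; split_ifs with h
    · rfl
    · simp at h; simp [h]
  rw [hfun, scan_desc l.length
    (fun i => PySem.List.pyGetD l i 0 * (3:Int) ^ (((l.length : Int)) - 1 - i).toNat)]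
  apply congrArg List.sum
  apply List.map_congr_left
  intro k hk
  have hk' : k < l.length := List.mem_range.mp hk
  have he : (((l.length : Int)) - 1 - (k:Int)).toNat = l.length - 1 - k := by omega
  simp [he]

-- changing a range-sum at one index
theorem sum_map_range_set (m j : Nat) (hj : j < m) (f f' : Nat → Int)
    (h : ∀ i, i ≠ j → f' i = f i) :
    ((List.range m).map f').sum = ((List.range m).map f).sum + (f' j - f j) := by
  obtain ⟨r, rfl⟩ : ∃ r, m = j + (r+1) := ⟨m - j - 1, by omega⟩
  rw [List.range_add]
  simp only [List.map_append, List.sum_append, List.range_succ_eq_map, List.map_cons,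
    List.sum_cons, List.map_map]
  have h1 : (List.range j).map f' = (List.range j).map f :=
    List.map_congr_left (fun a ha => h a (by have := List.mem_range.mp ha; omega))
  simp only [Function.comp_def, Nat.add_zero]
  have h2 : (List.range r).map (fun x => f' (j + Nat.succ x))
      = (List.range r).map (fun x => f (j + Nat.succ x)) :=
    List.map_congr_left (fun a _ => h _ (by omega))
  rw [h1, h2]
  ring

theorem getD_set_eq_ite (l : List Int) (j : Nat) (x : Int) (i : Nat) (hj : j < l.length) :
    (l.set j x).getD i 0 = if i = j then x else l.getD i 0 := by
  by_cases hij : i = j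
  · subst hij; simp [List.getD, hj]
  · simp [List.getD, List.getElem?_set_ne (by omega : j ≠ i), hij]

theorem base3_set (l : List Int) (j : Nat) (hj : j < l.length) (x : Int) :
    pvBase3 (l.set j x) = pvBase3 l + (x - l.getD j 0) * (3 : Int) ^ (l.length - 1 - j) := by
  unfold pvBase3
  simp only [List.length_set]
  rw [sum_map_range_set l.length j hj
    (fun jj => l.getD jj 0 * (3:Int) ^ (l.length - 1 - jj))
    (fun jj => (l.set j x).getD jj 0 * (3:Int) ^ (l.length - 1 - jj))
    (fun i hi => by simp only [getD_set_eq_ite l j x i hj]; simp [hi])]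
  simp only [getD_set_eq_ite l j x j hj]
  simp; ring

theorem base2_flip (l : List Int) (i : Nat) (hi : i < l.length) :
    pvBase2 (l.set i (if l.getD i 0 = 1 then 0 else 1)) =
      (if l.getD i 0 = 1 then pvBase2 l - (2 : Int) ^ (l.length - 1 - i)
       else pvBase2 l + (2 : Int) ^ (l.length - 1 - i)) := by
  unfold pvBase2
  simp only [List.length_set]
  rw [sum_map_range_set l.length i hi
    (fun k => if l.getD k 0 = 1 then (2:Int) ^ (l.length - 1 - k) else 0)
    (fun k => if (l.set i (if l.getD i 0 = 1 then 0 else 1)).getD k 0 = 1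
              then (2:Int) ^ (l.length - 1 - k) else 0)
    (fun k hk => by simp only [getD_set_eq_ite l i _ k hi]; simp [hk])]
  have hset : (l.set i (if l.getD i 0 = 1 then (0:Int) else 1)).getD i 0
      = (if l.getD i 0 = 1 then (0:Int) else 1) := by
    rw [getD_set_eq_ite l i _ i hi]; simp
  by_cases h1 : l.getD i 0 = 1
  · simp only [h1]
    norm_num [List.getElem?_set_self, hi, List.getD]
    ring
  · simp only [if_neg h1]
    norm_num [List.getElem?_set_self, hi, List.getD, h1]

theorem x_eq (n2 : Int) (b3 : List Int) (j : Nat) (hj : j < b3.length) (xs : List Int) :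
    pvAx n2 b3 j xs = pvBx (pvBase3 b3) n2 (b3.getD j 0) ((3 : Int) ^ (b3.length - 1 - j)) xs := by
  induction xs with
  | nil => rfl
  | cons x xs ih =>
    simp only [pvAx, pvBx, scan3_eq_base3, base3_set b3 j hj x, ih]

theorem j_eq (n2 : Int) (b3 : List Int) (js : List Nat) (h : ∀ j ∈ js, j < b3.length) :
    pvAj n2 b3 js = pvBj (pvBase3 b3) n2 b3 js := by
  induction js with
  | nil => rfl
  | cons j js ih =>
    simp only [pvAj, pvBj, x_eq n2 b3 j (h j (by simp)),
      ih (fun a ha => h a (by simp [ha]))]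

theorem i_eq (b2 b3 : List Int) (is : List Nat) (h : ∀ i ∈ is, i < b2.length) :
    pvAi b2 b3 is = pvBi (pvBase2 b2) (pvBase3 b3) b2 b3 is := by
  induction is with
  | nil => rfl
  | cons i is ih =>
    have hi : i < b2.length := h i (by simp)
    simp only [pvAi, pvBi, scan2_eq_base2, base2_flip b2 i hi, scan3_eq_base3,
      j_eq _ b3 _ (fun a ha => List.mem_range.mp ha),
      ih (fun a ha => h a (by simp [ha]))]

-- ===== VERDICT (by name: the statement is the Claim_ definition above) =====
theorem CHECK_spec : Claim_equal_CHECK := by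
  intro b2 b3 _
  unfold Spec_CHECK CHECK CHECK_alt
  exact i_eq b2 b3 _ (fun i hi => List.mem_range.mp hi)
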